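-- pv_equiv track=rewrite | github.com/AndersKallberg/PROTAC_splitter | protac_splitter/gnn/data/data_augmentation.py | get_cluster_substructure_attachment_counts
-- ===== SOURCE A (Python) =====
-- from collections import defaultdict
--
-- def get_cluster_substructure_attachment_counts(augmented_protac_substr_idx: list) -> tuple:
--     """
--     Calculate the counts of cluster, substructure, and attachment point occurrences in a list of protacs.
--
--     Args:
--         augmented_protac_substr_idx (list): A list of tuples representing protacs. Each tuple contains 3 elements
--                                             (for POI, linker, E3), where each element is a tuple itself containing
--                                             indices for cluster, substructure, and attachment point.
--
--     Returns:
--         tuple: A tuple containing three dictionaries. The first dictionary represents the counts of cluster occurrences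
--                for each substructure type. The second dictionary represents the counts of substructure occurrences for
--                each substructure type and cluster. The third dictionary represents the counts of attachment point
--                occurrences for each substructure type, substructure, and cluster.
--     """
--     # protacs is a list of tuples, where each tuple contains 3 elements (for POI, linker, E3)
--     # Each element is a tuple itself, containing indices for cluster, substructure, and attachment point
--
--     # Initialize structures to count occurrences
--     cluster_counts = defaultdict(lambda: defaultdict(int))
--     substructure_counts = defaultdict(lambda: defaultdict(int))
--     attachment_point_counts = defaultdict(lambda: defaultdict(int))
--
--     # Process protacs to fill the structures
--     for protac in augmented_protac_substr_idx:
--         for idx, substructure_type in enumerate(["POI", "Linker", "E3"]):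
--             cluster_idx, substructure_idx, attachment_point_idx = protac[idx]
--
--             # Count occurrences
--             cluster_counts[substructure_type][(cluster_idx,)] += 1
--             substructure_counts[substructure_type][(
--                 cluster_idx, substructure_idx)] += 1
--             attachment_point_counts[substructure_type][(
--                 cluster_idx, substructure_idx, attachment_point_idx)] += 1
--
--     return cluster_counts, substructure_counts, attachment_point_counts
-- ===== SOURCE B (Python) =====
-- from collections import defaultdict
--
--
-- def get_cluster_substructure_attachment_counts(augmented_protac_substr_idx: list) -> tuple:
--     """Build only the finest table (one counting pass), then derive the substructure
--     and cluster tables by rolling up its entries instead of counting them again."""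
--     cluster_counts = defaultdict(lambda: defaultdict(int))
--     substructure_counts = defaultdict(lambda: defaultdict(int))
--     attachment_point_counts = defaultdict(lambda: defaultdict(int))
--
--     for protac in augmented_protac_substr_idx:
--         for substructure_type, (c, s, a) in zip(["POI", "Linker", "E3"], protac):
--             attachment_point_counts[substructure_type][(c, s, a)] += 1
--
--     for substructure_type, table in attachment_point_counts.items():
--         sub = substructure_counts[substructure_type]
--         for key, n in table.items():
--             sub[key[:2]] += n
--         clu = cluster_counts[substructure_type]
--         for key, n in sub.items():
--             clu[key[:1]] += n
--
--     return cluster_counts, substructure_counts, attachment_point_counts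
-- ===== Notes on version B (the rewrite author's own statement) =====
-- stated objective: alternative
-- what changed: A counts all three tables independently while scanning the input; B counts only the finest (cluster,substructure,attachment) table in one pass and then derives the substructure and cluster tables by rolling up (summing) the finest table's entries, so the raw data is scanned once instead of three counting streams.
import Mathlib
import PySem

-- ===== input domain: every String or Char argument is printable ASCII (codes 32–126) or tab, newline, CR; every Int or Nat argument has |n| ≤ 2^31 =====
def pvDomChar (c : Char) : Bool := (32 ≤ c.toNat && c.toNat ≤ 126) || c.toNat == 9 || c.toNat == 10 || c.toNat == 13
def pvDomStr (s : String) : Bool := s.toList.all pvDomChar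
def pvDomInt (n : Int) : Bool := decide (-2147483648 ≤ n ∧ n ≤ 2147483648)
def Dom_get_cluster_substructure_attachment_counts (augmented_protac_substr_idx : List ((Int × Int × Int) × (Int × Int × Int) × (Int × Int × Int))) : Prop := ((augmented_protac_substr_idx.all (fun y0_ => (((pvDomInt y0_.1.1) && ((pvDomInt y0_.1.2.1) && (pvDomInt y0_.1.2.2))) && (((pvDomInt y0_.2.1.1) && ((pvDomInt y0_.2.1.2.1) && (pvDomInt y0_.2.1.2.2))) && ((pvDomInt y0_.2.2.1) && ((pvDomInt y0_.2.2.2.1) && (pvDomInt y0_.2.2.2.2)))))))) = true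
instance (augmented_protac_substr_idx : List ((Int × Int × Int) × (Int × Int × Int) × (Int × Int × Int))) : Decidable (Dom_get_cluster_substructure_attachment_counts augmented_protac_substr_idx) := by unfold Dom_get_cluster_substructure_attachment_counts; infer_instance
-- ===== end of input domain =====

-- ===== PORT A =====
-- B counts only the finest (cluster,substructure,attachment) table in one pass and
-- derives the other two tables by rolling up its entries; objective: alternative (no speed claim).

-- defaultdict(lambda: defaultdict(int)) increment  d[t][k] += 1
def pvBump (d : PySem.Dict String (PySem.Dict (List Int) Int)) (t : String) (k : List Int) :
    PySem.Dict String (PySem.Dict (List Int) Int) :=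
  d.modify t PySem.Dict.empty (fun inner => inner.modify k 0 (· + 1))

-- type-convention conversion: nested dict → association list of association lists
def pvItems (d : PySem.Dict String (PySem.Dict (List Int) Int)) :
    List (String × List (List Int × Int)) :=
  d.items.map (fun p => (p.1, p.2.items))

def get_cluster_substructure_attachment_counts (augmented_protac_substr_idx : List ((Int × Int × Int) × (Int × Int × Int) × (Int × Int × Int))) : (List (String × List (List Int × Int))) × (List (String × List (List Int × Int))) × (List (String × List (List Int × Int))) :=
  let st := augmented_protac_substr_idx.foldl
    (fun st protac =>
      [("POI", protac.1), ("Linker", protac.2.1), ("E3", protac.2.2)].foldl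
        (fun st tx =>
          (pvBump st.1 tx.1 [tx.2.1],
           pvBump st.2.1 tx.1 [tx.2.1, tx.2.2.1],
           pvBump st.2.2 tx.1 [tx.2.1, tx.2.2.1, tx.2.2.2])) st)
    (PySem.Dict.empty, PySem.Dict.empty, PySem.Dict.empty)
  (pvItems st.1, pvItems st.2.1, pvItems st.2.2)

-- ===== PORT B =====
-- for key, n in t: inner[key[:p]] += n   (the roll-up loop of Source B)
def pvRollStep (t : List (List Int × Int)) (p : Nat) (inner : PySem.Dict (List Int) Int) :
    PySem.Dict (List Int) Int :=
  t.foldl (fun inn kn => inn.modify (kn.1.take p) 0 (· + kn.2)) inner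

def get_cluster_substructure_attachment_counts_alt (augmented_protac_substr_idx : List ((Int × Int × Int) × (Int × Int × Int) × (Int × Int × Int))) : (List (String × List (List Int × Int))) × (List (String × List (List Int × Int))) × (List (String × List (List Int × Int))) :=
  -- pass 1: only the finest table
  let ap := augmented_protac_substr_idx.foldl
    (fun d protac =>
      (List.zip ["POI", "Linker", "E3"] [protac.1, protac.2.1, protac.2.2]).foldl
        (fun d tx =>
          d.modify tx.1 PySem.Dict.empty
            (fun inner => inner.modify [tx.2.1, tx.2.2.1, tx.2.2.2] 0 (· + 1))) d)
    PySem.Dict.empty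
  -- pass 2: roll the finest table up to the substructure and cluster tables
  let sc := ap.items.foldl
    (fun sc ti =>
      let sub := pvRollStep ti.2.items 2 (sc.1.getD ti.1 PySem.Dict.empty)
      let subd := sc.1.insert ti.1 sub
      let clu := pvRollStep sub.items 1 (sc.2.getD ti.1 PySem.Dict.empty)
      (subd, sc.2.insert ti.1 clu))
    (PySem.Dict.empty, PySem.Dict.empty)
  (pvItems sc.2, pvItems sc.1, pvItems ap)

-- ===== PRECONDITION & SPEC =====
def Spec_get_cluster_substructure_attachment_counts (augmented_protac_substr_idx : List ((Int × Int × Int) × (Int × Int × Int) × (Int × Int × Int))) (out : (List (String × List (List Int × Int))) × (List (String × List (List Int × Int))) × (List (String × List (List Int × Int)))) : Prop := out = get_cluster_substructure_attachment_counts_alt augmented_protac_substr_idx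
instance (augmented_protac_substr_idx : List ((Int × Int × Int) × (Int × Int × Int) × (Int × Int × Int))) (out : (List (String × List (List Int × Int))) × (List (String × List (List Int × Int))) × (List (String × List (List Int × Int)))) : Decidable (Spec_get_cluster_substructure_attachment_counts augmented_protac_substr_idx out) := by
  unfold Spec_get_cluster_substructure_attachment_counts
  have h1 : DecidableEq (List (String × List (List Int × Int))) := fun a b => by infer_instance
  exact @instDecidableEqProd _ _ h1 (@instDecidableEqProd _ _ h1 h1) out _

-- ===== CLAIM (what is proved, stated in full; the proofs are below) =====
def Claim_equal_get_cluster_substructure_attachment_counts : Prop := ∀ (augmented_protac_substr_idx : List ((Int × Int × Int) × (Int × Int × Int) × (Int × Int × Int))), Dom_get_cluster_substructure_attachment_counts augmented_protac_substr_idx → Spec_get_cluster_substructure_attachment_counts augmented_protac_substr_idx (get_cluster_substructure_attachment_counts augmented_protac_substr_idx)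

-- ===== LEMMAS AND PROOFS =====

-- the element stream of the nested counting loop, flattened
def pvFlat (aps : List ((Int × Int × Int) × (Int × Int × Int) × (Int × Int × Int))) :
    List (String × (Int × Int × Int)) :=
  aps.flatMap (fun protac => [("POI", protac.1), ("Linker", protac.2.1), ("E3", protac.2.2)])

-- one grouped-counting fold, with key projection k
def pvGrp (k : (Int × Int × Int) → List Int) (l : List (String × (Int × Int × Int))) :
    PySem.Dict String (PySem.Dict (List Int) Int) :=
  l.foldl (fun d tx => pvBump d tx.1 (k tx.2)) PySem.Dict.empty

-- A's triple-state fold is three independent grouped folds over the flattened stream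
lemma pvSplit3 (l : List (String × (Int × Int × Int)))
    (s : PySem.Dict String (PySem.Dict (List Int) Int) ×
         PySem.Dict String (PySem.Dict (List Int) Int) ×
         PySem.Dict String (PySem.Dict (List Int) Int)) :
    l.foldl (fun st tx =>
        (pvBump st.1 tx.1 [tx.2.1],
         pvBump st.2.1 tx.1 [tx.2.1, tx.2.2.1],
         pvBump st.2.2 tx.1 [tx.2.1, tx.2.2.1, tx.2.2.2])) s
      = (l.foldl (fun d tx => pvBump d tx.1 [tx.2.1]) s.1,
         l.foldl (fun d tx => pvBump d tx.1 [tx.2.1, tx.2.2.1]) s.2.1,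
         l.foldl (fun d tx => pvBump d tx.1 [tx.2.1, tx.2.2.1, tx.2.2.2]) s.2.2) := by
  induction l generalizing s with
  | nil => rfl
  | cons x xs ih => simp [List.foldl_cons, ih]

-- lookup in a grouped fold = inner fold over the elements filtered to that key
lemma pvGrp_getD (u : (Int × Int × Int) → PySem.Dict (List Int) Int → PySem.Dict (List Int) Int)
    (l : List (String × (Int × Int × Int)))
    (d : PySem.Dict String (PySem.Dict (List Int) Int)) (t : String) :
    (l.foldl (fun d tx => d.modify tx.1 PySem.Dict.empty (u tx.2)) d).getD t PySem.Dict.empty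
      = ((l.filter (fun tx => tx.1 == t)).map (·.2)).foldl (fun i x => u x i)
          (d.getD t PySem.Dict.empty) := by
  induction l generalizing d with
  | nil => rfl
  | cons x xs ih =>
    simp only [List.foldl_cons, List.filter_cons]
    by_cases h : t = x.1
    · simp [← h, ih]
    · have h' : (x.1 == t) = false := by simp; exact fun e => h e.symm
      simp [h', ih, PySem.Dict.getD_modify, h]

lemma pvGrp_keys (k : (Int × Int × Int) → List Int) (l : List (String × (Int × Int × Int))) :
    (pvGrp k l).keys = PySem.Set.ofList (l.map (·.1)) := by
  have := PySem.Dict.keys_foldl_modify_key (l := l) (key := fun tx => tx.1)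
    (d0 := PySem.Dict.empty)
    (f := fun _ tx => (fun inner : PySem.Dict (List Int) Int => inner.modify (k tx.2) 0 (· + 1)))
    (d := PySem.Dict.empty)
  simpa [pvGrp, pvBump, PySem.Set.ofList, PySem.Set.update, PySem.Dict.keys_empty] using this

lemma pvGrp_nodup (k : (Int × Int × Int) → List Int) (l : List (String × (Int × Int × Int))) :
    (pvGrp k l).keys.Nodup := by
  have := PySem.Dict.nodup_keys_foldl_modify_key (l := l) (key := fun tx => tx.1)
    (d0 := PySem.Dict.empty)
    (f := fun _ tx => (fun inner : PySem.Dict (List Int) Int => inner.modify (k tx.2) 0 (· + 1)))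
    (d := PySem.Dict.empty) (by simp)
  simpa [pvGrp, pvBump] using this

-- the inner dict at key t is the Counter of the key-projected column
lemma pvGrp_getD_counter (k : (Int × Int × Int) → List Int)
    (l : List (String × (Int × Int × Int))) (t : String) :
    (pvGrp k l).getD t PySem.Dict.empty
      = PySem.Dict.counter (((l.filter (fun tx => tx.1 == t)).map (·.2)).map k) := by
  have h := pvGrp_getD (fun x inner => inner.modify (k x) 0 (· + 1)) l PySem.Dict.empty t
  simp only [pvGrp, pvBump]
  rw [h, PySem.Dict.counter_eq_foldl, List.map_map, List.foldl_map, List.foldl_map]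
  simp [PySem.Dict.getD_empty, Function.comp]

-- items of a grouped fold, fully characterised
lemma pvGrp_items (k : (Int × Int × Int) → List Int) (l : List (String × (Int × Int × Int))) :
    (pvGrp k l).items
      = (PySem.Set.ofList (l.map (·.1))).map
          (fun t => (t, PySem.Dict.counter (((l.filter (fun tx => tx.1 == t)).map (·.2)).map k))) := by
  rw [PySem.Dict.items_eq_map_keys (pvGrp k l) (pvGrp_nodup k l) PySem.Dict.empty, pvGrp_keys]
  exact List.map_congr_left (fun t _ => by rw [pvGrp_getD_counter])

-- updating a set with elements it already has changes nothing
lemma pvUpdate_mem (s : PySem.Set String) (ys : List String)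
    (h : ∀ y ∈ ys, y ∈ s) : PySem.Set.update s ys = s := by
  induction ys generalizing s with
  | nil => rfl
  | cons y ys ih =>
    have hy : PySem.Set.add s y = s := by
      simp [PySem.Set.add, PySem.Set.contains]
      exact h y (by simp)
    simp only [PySem.Set.update, List.foldl_cons]
    rw [show List.foldl PySem.Set.add (PySem.Set.add s y) ys = PySem.Set.update (PySem.Set.add s y) ys from rfl]
    rw [hy]
    exact ih s (fun z hz => h z (by simp [hz]))

-- the tag stream of the flattened loop dedups to exactly the three type names
lemma pvFlat_tags (p : (Int × Int × Int) × (Int × Int × Int) × (Int × Int × Int))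
    (rest : List ((Int × Int × Int) × (Int × Int × Int) × (Int × Int × Int))) :
    PySem.Set.ofList ((pvFlat (p :: rest)).map (·.1)) = ["POI", "Linker", "E3"] := by
  have hmap : (pvFlat (p :: rest)).map (·.1)
      = ["POI", "Linker", "E3"] ++ (pvFlat rest).map (·.1) := by
    simp [pvFlat]
  rw [hmap, PySem.Set.ofList_append]
  have h1 : PySem.Set.ofList ["POI", "Linker", "E3"] = ["POI", "Linker", "E3"] := rfl
  rw [h1]
  apply pvUpdate_mem
  intro y hy
  simp only [pvFlat, List.map_flatMap, List.mem_flatMap] at hy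
  obtain ⟨q, _, hq⟩ := hy
  simp at hq
  rcases hq with h | h | h <;> simp [h]

-- the per-type filtered stream is the j-th column
lemma pvFlat_filter_POI (aps : List ((Int × Int × Int) × (Int × Int × Int) × (Int × Int × Int))) :
    ((pvFlat aps).filter (fun tx => tx.1 == "POI")).map (·.2) = aps.map (·.1) := by
  induction aps with
  | nil => rfl
  | cons p rest ih => simp [pvFlat] at ih ⊢; exact ih

lemma pvFlat_filter_Linker (aps : List ((Int × Int × Int) × (Int × Int × Int) × (Int × Int × Int))) :
    ((pvFlat aps).filter (fun tx => tx.1 == "Linker")).map (·.2) = aps.map (·.2.1) := by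
  induction aps with
  | nil => rfl
  | cons p rest ih => simp [pvFlat] at ih ⊢; exact ih

lemma pvFlat_filter_E3 (aps : List ((Int × Int × Int) × (Int × Int × Int) × (Int × Int × Int))) :
    ((pvFlat aps).filter (fun tx => tx.1 == "E3")).map (·.2) = aps.map (·.2.2) := by
  induction aps with
  | nil => rfl
  | cons p rest ih => simp [pvFlat] at ih ⊢; exact ih

-- A's fold over protacs equals the fold over the flattened stream, split into three
lemma pvA_state (aps : List ((Int × Int × Int) × (Int × Int × Int) × (Int × Int × Int))) :
    aps.foldl
      (fun st protac =>
        [("POI", protac.1), ("Linker", protac.2.1), ("E3", protac.2.2)].foldl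
          (fun st tx =>
            (pvBump st.1 tx.1 [tx.2.1],
             pvBump st.2.1 tx.1 [tx.2.1, tx.2.2.1],
             pvBump st.2.2 tx.1 [tx.2.1, tx.2.2.1, tx.2.2.2])) st)
      (PySem.Dict.empty, PySem.Dict.empty, PySem.Dict.empty)
    = (pvGrp (fun x => [x.1]) (pvFlat aps),
       pvGrp (fun x => [x.1, x.2.1]) (pvFlat aps),
       pvGrp (fun x => [x.1, x.2.1, x.2.2]) (pvFlat aps)) := by
  rw [← List.foldl_flatMap, pvSplit3]
  rfl

-- B's first pass is A's third grouped fold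
lemma pvB_ap (aps : List ((Int × Int × Int) × (Int × Int × Int) × (Int × Int × Int))) :
    aps.foldl
      (fun d protac =>
        (List.zip ["POI", "Linker", "E3"] [protac.1, protac.2.1, protac.2.2]).foldl
          (fun d tx =>
            d.modify tx.1 PySem.Dict.empty
              (fun inner => inner.modify [tx.2.1, tx.2.2.1, tx.2.2.2] 0 (· + 1))) d)
      PySem.Dict.empty
    = pvGrp (fun x => [x.1, x.2.1, x.2.2]) (pvFlat aps) := by
  rw [pvGrp, ← List.foldl_flatMap]
  rfl

-- ---- roll-up of a Counter: generic facts ----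

-- getD of the weighted roll-up fold = initial value + sum of the weights in t's class
lemma pvGetD_wfold (g : List Int → List Int) (l : List (List Int × Int))
    (d : PySem.Dict (List Int) Int) (t : List Int) :
    (l.foldl (fun inn kn => inn.modify (g kn.1) 0 (· + kn.2)) d).getD t 0
      = d.getD t 0 + ((l.filter (fun kn => g kn.1 == t)).map (·.2)).sum := by
  induction l generalizing d with
  | nil => simp
  | cons x xs ih =>
    simp only [List.foldl_cons, List.filter_cons]
    by_cases h : t = g x.1
    · simp [ih, ← h]; ring
    · have h' : (g x.1 == t) = false := by simp; exact fun e => h e.symm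
      simp [h', ih, PySem.Dict.getD_modify, h]

-- sum of the multiplicities of the distinct elements in a class = size of the class
lemma pvSumCount (K : List (List Int)) (m : List (List Int)) (p : List Int → Bool)
    (hnd : K.Nodup) (hsub : ∀ x ∈ m, x ∈ K) :
    ((K.filter p).map (fun k => (m.count k : Int))).sum = ((m.filter p).length : Int) := by
  induction K generalizing m with
  | nil =>
    have : m = [] := by
      cases m with
      | nil => rfl
      | cons a l => exact absurd (hsub a (by simp)) (by simp)
    simp [this]
  | cons k K' ih =>
    have hk : k ∉ K' := (List.nodup_cons.mp hnd).1
    have hnd' : K'.Nodup := (List.nodup_cons.mp hnd).2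
    set m' := m.filter (fun y => !(y == k)) with hm'
    have hsub' : ∀ x ∈ m', x ∈ K' := by
      intro x hx
      have hxm := List.mem_of_mem_filter hx
      have hxk : x ≠ k := by have := List.of_mem_filter hx; simpa using this
      rcases List.mem_cons.mp (hsub x hxm) with h | h
      · exact absurd h hxk
      · exact h
    have hcongr : (K'.filter p).map (fun k' => (m.count k' : Int))
        = (K'.filter p).map (fun k' => (m'.count k' : Int)) := by
      apply List.map_congr_left
      intro k' hk'
      have hne : k' ≠ k := fun e => hk (e ▸ List.mem_of_mem_filter hk')
      rw [hm', List.count_filter (by simpa using hne)]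
    by_cases hp : p k = true
    · rw [List.filter_cons_of_pos hp, List.map_cons, List.sum_cons, hcongr, ih m' hnd' hsub']
      have hlen : (m.filter p).length = m.count k + (m'.filter p).length := by
        rw [hm', List.filter_comm]
        have h1 : (m.filter p).length
            = ((m.filter p).filter (fun y => y == k)).length
              + ((m.filter p).filter (fun y => !(y == k))).length :=
          List.length_eq_length_filter_add _
        have h2 : ((m.filter p).filter (fun y => y == k)).length = m.count k := by
          rw [← List.countP_eq_length_filter]
          show (m.filter p).count k = m.count k
          exact List.count_filter hp
        omega
      rw [hlen]; push_cast; ring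
    · rw [List.filter_cons_of_neg hp, hcongr, ih m' hnd' hsub']
      congr 2
      rw [hm', List.filter_comm]
      have hfix : List.filter (fun y => !(y == k)) (List.filter p m) = List.filter p m :=
        List.filter_eq_self.mpr (by
          intro a ha
          have hpa := List.of_mem_filter ha
          simp only [Bool.not_eq_true', beq_eq_false_iff_ne]
          exact fun e => hp (e ▸ hpa))
      rw [hfix]

lemma pvAdd_of_mem {s : PySem.Set (List Int)} {y : List Int} (h : y ∈ s) :
    PySem.Set.add s y = s := by
  simp [PySem.Set.add, PySem.Set.contains, h]

lemma pvAdd_of_not_mem {s : PySem.Set (List Int)} {y : List Int} (h : y ∉ s) :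
    PySem.Set.add s y = s ++ [y] := by
  simp [PySem.Set.add, PySem.Set.contains, h]

-- dedup commutes with map under a final dedup
lemma pvOfList_map (g : List Int → List Int) (m : List (List Int)) :
    PySem.Set.ofList ((PySem.Set.ofList m).map g) = PySem.Set.ofList (m.map g) := by
  induction m using List.reverseRecOn with
  | nil => rfl
  | append_singleton m x ih =>
    rw [PySem.Set.ofList_append_singleton, List.map_append, List.map_singleton,
      PySem.Set.ofList_append_singleton]
    by_cases hx : x ∈ PySem.Set.ofList m
    · rw [pvAdd_of_mem hx, ih]
      have : g x ∈ PySem.Set.ofList (m.map g) := by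
        rw [PySem.Set.mem_ofList _ _]
        exact List.mem_map_of_mem ((PySem.Set.mem_ofList _ _).1 hx)
      rw [pvAdd_of_mem this]
    · rw [pvAdd_of_not_mem hx, List.map_append, List.map_singleton,
        PySem.Set.ofList_append_singleton, ih]

-- rolling up a Counter's items under a key projection g gives the Counter of the projected list
lemma pvRoll_counter (g : List Int → List Int) (m : List (List Int)) :
    (PySem.Dict.counter m).items.foldl
        (fun inn kn => inn.modify (g kn.1) 0 (· + kn.2)) PySem.Dict.empty
      = PySem.Dict.counter (m.map g) := by
  have hndL : ((PySem.Dict.counter m).items.foldl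
      (fun inn kn => inn.modify (g kn.1) 0 (· + kn.2)) PySem.Dict.empty).keys.Nodup := by
    have := PySem.Dict.nodup_keys_foldl_modify_key (l := (PySem.Dict.counter m).items)
      (key := fun kn => g kn.1) (d0 := (0 : Int))
      (f := fun _ kn => (fun v : Int => v + kn.2)) (d := PySem.Dict.empty) (by simp)
    simpa using this
  have hkeys : ((PySem.Dict.counter m).items.foldl
      (fun inn kn => inn.modify (g kn.1) 0 (· + kn.2)) PySem.Dict.empty).keys
      = PySem.Set.ofList (m.map g) := by
    have := PySem.Dict.keys_foldl_modify_key (l := (PySem.Dict.counter m).items)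
      (key := fun kn => g kn.1) (d0 := (0 : Int))
      (f := fun _ kn => (fun v : Int => v + kn.2)) (d := PySem.Dict.empty)
    rw [this, PySem.Dict.keys_empty, PySem.Dict.items_counter, List.map_map]
    show PySem.Set.update [] ((PySem.Set.ofList m).map g) = _
    rw [PySem.Set.update_nil_left, pvOfList_map]
  have hgetD : ∀ t, ((PySem.Dict.counter m).items.foldl
      (fun inn kn => inn.modify (g kn.1) 0 (· + kn.2)) PySem.Dict.empty).getD t 0
      = (PySem.Dict.counter (m.map g)).getD t 0 := by
    intro t
    rw [pvGetD_wfold, PySem.Dict.getD_empty, PySem.Dict.items_counter, List.filter_map,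
      List.map_map, PySem.Dict.getD_counter]
    have hsum := pvSumCount (PySem.Set.ofList m) m (fun k => g k == t)
      (PySem.Set.nodup_ofList m) (fun x hx => (PySem.Set.mem_ofList _ _).2 hx)
    have hcnt : (m.map g).count t = (m.filter (fun k => g k == t)).length := by
      rw [List.count, List.countP_map, List.countP_eq_length_filter]; rfl
    rw [hcnt, ← hsum]
    simp [Function.comp_def]
  have hL := PySem.Dict.items_eq_map_keys ((PySem.Dict.counter m).items.foldl
      (fun inn kn => inn.modify (g kn.1) 0 (· + kn.2)) PySem.Dict.empty) hndL (0 : Int)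
  have hR := PySem.Dict.items_eq_map_keys (PySem.Dict.counter (m.map g))
      (PySem.Dict.nodup_keys_counter _) (0 : Int)
  apply PySem.Dict.ext
  rw [hL, hR, hkeys, PySem.Dict.keys_counter]
  exact List.map_congr_left (fun t _ => by rw [hgetD t])

-- Source B's roll-up loop applied to a Counter = the Counter of the truncated keys
lemma pvRollStep_counter (m : List (List Int)) (p : Nat) :
    pvRollStep (PySem.Dict.counter m).items p PySem.Dict.empty
      = PySem.Dict.counter (m.map (fun k => k.take p)) :=
  pvRoll_counter (fun k => k.take p) m


-- filtered-and-projected flattened stream, fused form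
lemma pvFilter_map_POI (k : (Int × Int × Int) → List Int)
    (aps : List ((Int × Int × Int) × (Int × Int × Int) × (Int × Int × Int))) :
    List.map (fun tx => k tx.2) (List.filter (fun tx => tx.1 == "POI") (pvFlat aps))
      = List.map (fun x => k x.1) aps := by
  induction aps with
  | nil => rfl
  | cons p rest ih => simp [pvFlat] at ih ⊢; exact ih

lemma pvFilter_map_Linker (k : (Int × Int × Int) → List Int)
    (aps : List ((Int × Int × Int) × (Int × Int × Int) × (Int × Int × Int))) :
    List.map (fun tx => k tx.2) (List.filter (fun tx => tx.1 == "Linker") (pvFlat aps))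
      = List.map (fun x => k x.2.1) aps := by
  induction aps with
  | nil => rfl
  | cons p rest ih => simp [pvFlat] at ih ⊢; exact ih

lemma pvFilter_map_E3 (k : (Int × Int × Int) → List Int)
    (aps : List ((Int × Int × Int) × (Int × Int × Int) × (Int × Int × Int))) :
    List.map (fun tx => k tx.2) (List.filter (fun tx => tx.1 == "E3") (pvFlat aps))
      = List.map (fun x => k x.2.2) aps := by
  induction aps with
  | nil => rfl
  | cons p rest ih => simp [pvFlat] at ih ⊢; exact ih

theorem pv_main : ∀ (aps : List ((Int × Int × Int) × (Int × Int × Int) × (Int × Int × Int))),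
    get_cluster_substructure_attachment_counts aps
      = get_cluster_substructure_attachment_counts_alt aps := by
  intro aps
  cases aps with
  | nil => rfl
  | cons p rest =>
    show (pvItems _, pvItems _, pvItems _) = _
    rw [pvA_state]
    unfold get_cluster_substructure_attachment_counts_alt
    rw [pvB_ap]
    simp only [pvGrp_items, pvFlat_tags, List.map_cons, List.map_nil,
      List.foldl_cons, List.foldl_nil]
    rw [pvFlat_filter_POI, pvFlat_filter_Linker, pvFlat_filter_E3]
    simp only [PySem.Dict.getD_insert, PySem.Dict.getD_empty, String.reduceEq, reduceIte,
      pvRollStep_counter]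
    simp [pvItems, PySem.Dict.items_insert_of_not_contains, PySem.Dict.contains_insert,
      PySem.Dict.empty, List.map_map, List.take_succ_cons, List.take_zero,
      pvGrp_items, pvFlat_tags, Function.comp_def]
    rw [pvFilter_map_POI (fun y => [y.1]), pvFilter_map_Linker (fun y => [y.1]),
      pvFilter_map_E3 (fun y => [y.1]), pvFilter_map_POI (fun y => [y.1, y.2.1]),
      pvFilter_map_Linker (fun y => [y.1, y.2.1]), pvFilter_map_E3 (fun y => [y.1, y.2.1])]
    simp

-- ===== VERDICT (by name: the statement is the Claim_ definition above) =====
theorem get_cluster_substructure_attachment_counts_spec : Claim_equal_get_cluster_substructure_attachment_counts := by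
  intro aps _
  unfold Spec_get_cluster_substructure_attachment_counts
  exact pv_main aps
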